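-- pv_equiv track=rewrite | github.com/avishek376/Scaler-Problem-Solving | Advanced/04 Advanced DSA : Bit Manipulations - 1 /Homework/Q1. Interesting Array /Interesting Array.py | solve
-- ===== SOURCE A (Python) =====
-- def solve(A):
--     val = 0
--     n = len(A)
--     for i in range(n):
--         val = val^A[i]
--
--     if val%2 == 0:
--         return "Yes"
--     return "No"
-- ===== SOURCE B (Python) =====
-- def solve(A):
--     count = 0
--     for x in A:
--         count += x & 1
--     if count % 2 == 0:
--         return "Yes"
--     return "No"
-- ===== Notes on version B (the rewrite author's own statement) =====
-- stated objective: alternative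
-- what changed: B counts the odd elements with a bitwise & 1 accumulator instead of maintaining a running XOR of all elements, then tests the parity of that count.
import Mathlib
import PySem

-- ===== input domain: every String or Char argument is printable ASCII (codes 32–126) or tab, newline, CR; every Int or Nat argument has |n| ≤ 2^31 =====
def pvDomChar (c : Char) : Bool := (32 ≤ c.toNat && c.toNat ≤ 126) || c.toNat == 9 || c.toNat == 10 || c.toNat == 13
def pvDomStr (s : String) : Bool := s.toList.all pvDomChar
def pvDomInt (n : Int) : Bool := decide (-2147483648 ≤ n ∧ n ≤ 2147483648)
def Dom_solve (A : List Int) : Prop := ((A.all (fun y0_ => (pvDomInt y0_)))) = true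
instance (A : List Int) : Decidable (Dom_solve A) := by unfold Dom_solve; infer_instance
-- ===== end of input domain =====

-- B replaces A's running XOR by a one-pass odd-element counter (x & 1) and tests the
-- counter's parity; alternative decomposition, same cost.

-- ===== PORT A =====
-- val = 0; for i in range(n): val = val ^ A[i]; return "Yes" iff val % 2 == 0
def solve (A : List Int) : String :=
  let n : Int := (A.length : Int)
  let val : Int :=
    (PySem.List.pyRange 0 n 1).foldl
      (fun val i => PySem.Int.bxor val (PySem.List.pyGetD A i 0)) 0
  if PySem.Int.mod val 2 = 0 then "Yes" else "No"

-- ===== PORT B =====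
-- count = 0; for x in A: count += x & 1; return "Yes" iff count % 2 == 0
def solve_alt (A : List Int) : String :=
  let count : Int := A.foldl (fun c x => c + PySem.Int.band x 1) 0
  if PySem.Int.mod count 2 = 0 then "Yes" else "No"

-- ===== PRECONDITION & SPEC =====
def Spec_solve (A : List Int) (out : String) : Prop := out = solve_alt A
instance (A : List Int) (out : String) : Decidable (Spec_solve A out) := by unfold Spec_solve; infer_instance

-- ===== CLAIM (what is proved, stated in full; the proofs are below) =====
def Claim_equal_solve : Prop := ∀ (A : List Int), Dom_solve A → Spec_solve A (solve A)

-- ===== LEMMAS AND PROOFS =====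

theorem pv_nat_xor_mod_two (m n : Nat) : (m ^^^ n) % 2 = (m % 2 + n % 2) % 2 := by
  have h : (m ^^^ n).testBit 0 = ((m.testBit 0).xor (n.testBit 0)) := Nat.testBit_xor ..
  simp only [Nat.testBit_zero] at h
  rcases Nat.mod_two_eq_zero_or_one m with hm | hm <;>
    rcases Nat.mod_two_eq_zero_or_one n with hn | hn <;>
      rcases Nat.mod_two_eq_zero_or_one (m ^^^ n) with hx | hx <;>
        simp [hm, hn, hx] at h ⊢

theorem pv_bxor_emod_two (a b : Int) : (PySem.Int.bxor a b) % 2 = (a + b) % 2 := by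
  unfold PySem.Int.bxor
  split_ifs with ha hb hb <;>
    · have h := pv_nat_xor_mod_two
        (if 0 ≤ a then a.toNat else (-a - 1).toNat)
        (if 0 ≤ b then b.toNat else (-b - 1).toNat)
      simp only [ha, hb, if_true, if_false] at h ⊢ <;> omega

theorem pv_band_one_emod (x : Int) : PySem.Int.band x 1 = x % 2 := by
  rw [PySem.Int.band_one, PySem.Int.mod_eq_emod_of_pos (by norm_num)]

theorem pv_fold_parity (L : List Int) :
    ∀ (v c : Int), v % 2 = c % 2 →
      (L.foldl PySem.Int.bxor v) % 2 =
      (L.foldl (fun c x => c + PySem.Int.band x 1) c) % 2 := by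
  induction L with
  | nil => intro v c h; simpa using h
  | cons x t ih =>
    intro v c h
    simp only [List.foldl_cons]
    exact ih _ _ (by rw [pv_bxor_emod_two, pv_band_one_emod]; omega)

-- ===== VERDICT (by name: the statement is the Claim_ definition above) =====
theorem solve_spec : Claim_equal_solve := by
  intro A _
  unfold Spec_solve solve solve_alt
  show (if PySem.Int.mod ((PySem.List.pyRange 0 (A.length : Int) 1).foldl
          (fun val i => PySem.Int.bxor val (PySem.List.pyGetD A i 0)) 0) 2 = 0
        then "Yes" else "No")
      = (if PySem.Int.mod (A.foldl (fun c x => c + PySem.Int.band x 1) 0) 2 = 0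
         then "Yes" else "No")
  rw [PySem.List.foldl_pyRange_zero_pyGetD' A 0 PySem.Int.bxor 0]
  have h := pv_fold_parity A 0 0 rfl
  rw [PySem.Int.mod_eq_emod_of_pos (by norm_num : (0:Int) < 2),
      PySem.Int.mod_eq_emod_of_pos (by norm_num : (0:Int) < 2), h]
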